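-- pv_equiv track=rewrite | github.com/bssrdf/pyleet | M/MinimumWhiteTilesAfterCoveringWithCarpets.py | minimumWhiteTiles2
-- ===== SOURCE A (Python) =====
-- def minimumWhiteTiles2(floor: str, numCarpets: int, carpetLen: int) -> int:
--     n, nc, l = len(floor), numCarpets, carpetLen
--     dpk = [0 for _ in range(n+1)]
--     dpk1 = [0 for _ in range(n+1)]
--     #for i in range(1,n+1):
--     for k in range(nc):
--         for i in range(1,n+1):
--             jump = dpk[i-1] + (1 if floor[i-1] == '1' else 0)
--             cover = dpk1[max(0, i-l)] if k > 0 else 1000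
--             dpk[i] = min(jump, cover)
--         dpk1, dpk = dpk, dpk1
--     return dpk1[n]
-- ===== SOURCE B (Python) =====
-- def minimumWhiteTiles2(floor: str, numCarpets: int, carpetLen: int) -> int:
--     # Prefix-sum + running-minimum formulation of the same layered DP:
--     # layer_k[i] = W[i] + min_{0<=j<=i} (base_j - W[j]), maintained as a running min,
--     # instead of the per-cell recurrence min(layer_k[i-1] + white, cover).
--     if numCarpets <= 0:
--         return 0
--     n, l = len(floor), carpetLen
--     W = [0]
--     acc = 0
--     for ch in floor:
--         acc += 1 if ch == '1' else 0
--         W.append(acc)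
--     prev = [0] * (n + 1)
--     for k in range(numCarpets):
--         cur = [0]
--         best = 0
--         for i in range(1, n + 1):
--             c = prev[max(0, i - l)] if k > 0 else 1000
--             best = min(best, c - W[i])
--             cur.append(W[i] + best)
--         prev = cur
--     return prev[n]
-- ===== Notes on version B (the rewrite author's own statement) =====
-- stated objective: alternative
-- what changed: Replaces the per-cell DP recurrence min(dp[i-1]+white, cover) by a prefix-sum-of-whites plus running-minimum formulation: layer[i] = W[i] + min_{j<=i}(base_j - W[j]), so each layer is produced by a sliding minimum over cover terms instead of chaining through the previous cell.
import Mathlib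
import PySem

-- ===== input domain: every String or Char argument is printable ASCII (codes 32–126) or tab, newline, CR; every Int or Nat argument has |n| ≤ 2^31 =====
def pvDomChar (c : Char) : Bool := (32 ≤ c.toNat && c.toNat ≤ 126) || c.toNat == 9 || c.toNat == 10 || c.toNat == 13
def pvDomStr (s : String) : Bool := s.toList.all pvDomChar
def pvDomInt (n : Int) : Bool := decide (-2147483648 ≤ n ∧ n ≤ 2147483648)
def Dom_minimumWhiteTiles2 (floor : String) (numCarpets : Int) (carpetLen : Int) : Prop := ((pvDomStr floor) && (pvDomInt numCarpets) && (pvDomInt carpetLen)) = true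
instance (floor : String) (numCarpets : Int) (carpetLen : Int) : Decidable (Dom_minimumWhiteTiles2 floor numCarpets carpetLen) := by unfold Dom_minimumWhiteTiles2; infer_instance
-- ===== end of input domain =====

-- B replaces A's per-cell DP recurrence min(dp[i-1]+white, cover) by a prefix-sum-of-whites plus
-- running-minimum formulation of the same layered DP (alternative decomposition, same cost).

-- ===== PORT A =====
-- body of A's inner loop (jump/cover, then 'dpk[i] = min(jump, cover)')
def stepA (fl : List Char) (l : Int) (k : Int) (prev : List Int) (dpk : List Int) (i : Int) : List Int :=
  let jump := PySem.List.pyGetD dpk (i-1) 0 + (if PySem.List.pyGetD fl (i-1) ' ' = '1' then (1:Int) else 0)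
  let cover := if k > 0 then PySem.List.pyGetD prev (max 0 (i - l)) 0 else 1000
  PySem.List.pySetD dpk i (min jump cover)

-- one iteration of A's outer loop, including the swap 'dpk1, dpk = dpk, dpk1'
-- (the state pair is (dpk, dpk1))
def layerA (fl : List Char) (l : Int) (st : List Int × List Int) (k : Int) : List Int × List Int :=
  (st.2, (PySem.List.pyRange 1 ((fl.length : Int) + 1) 1).foldl (stepA fl l k st.2) st.1)

def minimumWhiteTiles2 (floor : String) (numCarpets : Int) (carpetLen : Int) : Int :=
  let fl := floor.toList
  let dpk : List Int := List.replicate (fl.length + 1) 0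
  let dpk1 : List Int := List.replicate (fl.length + 1) 0
  let st := (PySem.List.pyRange 0 numCarpets 1).foldl (layerA fl carpetLen) (dpk, dpk1)
  PySem.List.pyGetD st.2 (fl.length : Int) 0

-- ===== PORT B =====
-- Source B's prefix-sum list W of white counts (loop state: (W, acc))
def buildW (fl : List Char) : List Int :=
  (fl.foldl (fun (st : List Int × Int) ch =>
      let acc := st.2 + (if ch = '1' then (1:Int) else 0)
      (st.1 ++ [acc], acc)) ([0], 0)).1

-- body of Source B's inner loop (loop state: (cur, best))
def stepB (l : Int) (k : Int) (prev W : List Int) (st : List Int × Int) (i : Int) : List Int × Int :=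
  let c := if k > 0 then PySem.List.pyGetD prev (max 0 (i - l)) 0 else 1000
  let best := min st.2 (c - PySem.List.pyGetD W i 0)
  (st.1 ++ [PySem.List.pyGetD W i 0 + best], best)

-- one iteration of Source B's outer loop: the next layer built fresh by a running minimum
def layerB (fl : List Char) (l : Int) (W : List Int) (prev : List Int) (k : Int) : List Int :=
  ((PySem.List.pyRange 1 ((fl.length : Int) + 1) 1).foldl (stepB l k prev W) ([0], 0)).1

def minimumWhiteTiles2_alt (floor : String) (numCarpets : Int) (carpetLen : Int) : Int :=
  if numCarpets ≤ 0 then 0 else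
  let fl := floor.toList
  let W := buildW fl
  let prev0 : List Int := List.replicate (fl.length + 1) 0
  let prev := (PySem.List.pyRange 0 numCarpets 1).foldl (layerB fl carpetLen W) prev0
  PySem.List.pyGetD prev (fl.length : Int) 0

-- ===== PRECONDITION & SPEC =====
-- Pre_ excludes exactly the inputs on which Python A raises IndexError: with numCarpets ≥ 2, a
-- nonempty floor and a negative carpetLen, dpk1[max(0, i-l)] indexes past the end of dpk1
-- (Python B raises on the same inputs); A returns normally on every input Pre_ admits.
def Pre_minimumWhiteTiles2 (floor : String) (numCarpets : Int) (carpetLen : Int) : Prop :=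
  2 ≤ numCarpets → floor.toList ≠ [] → 0 ≤ carpetLen
instance (floor : String) (numCarpets : Int) (carpetLen : Int) : Decidable (Pre_minimumWhiteTiles2 floor numCarpets carpetLen) := by unfold Pre_minimumWhiteTiles2; infer_instance

def pvWitness_minimumWhiteTiles2 : String × Int × Int := ("10110", 2, 2)

def Spec_minimumWhiteTiles2 (floor : String) (numCarpets : Int) (carpetLen : Int) (out : Int) : Prop := out = minimumWhiteTiles2_alt floor numCarpets carpetLen
instance (floor : String) (numCarpets : Int) (carpetLen : Int) (out : Int) : Decidable (Spec_minimumWhiteTiles2 floor numCarpets carpetLen out) := by unfold Spec_minimumWhiteTiles2; infer_instance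

-- ===== CLAIM (what is proved, stated in full; the proofs are below) =====
def Claim_equal_minimumWhiteTiles2 : Prop := ∀ (floor : String) (numCarpets : Int) (carpetLen : Int), Dom_minimumWhiteTiles2 floor numCarpets carpetLen → Pre_minimumWhiteTiles2 floor numCarpets carpetLen → Spec_minimumWhiteTiles2 floor numCarpets carpetLen (minimumWhiteTiles2 floor numCarpets carpetLen)

-- ===== LEMMAS AND PROOFS =====

-- the white-tile indicator at position j, and the prefix count of whites
def wAt (fl : List Char) (j : Nat) : Int := if fl.getD j ' ' = '1' then 1 else 0

def Wc (fl : List Char) : Nat → Int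
  | 0 => 0
  | j+1 => Wc fl j + wAt fl j

-- the layered DP both programs compute: gDP K i = value of layer K at cell i
def gDP (fl : List Char) (l : Int) : Nat → Nat → Int
  | _, 0 => 0
  | 0, i+1 => min (gDP fl l 0 i + wAt fl i) 1000
  | K+1, i+1 => min (gDP fl l (K+1) i + wAt fl i) (gDP fl l K (max 0 ((i : Int) + 1 - l)).toNat)
termination_by K i => (K, i)

-- the cover term of layer K at cell i
def cval (fl : List Char) (l : Int) (K i : Nat) : Int :=
  if K = 0 then 1000 else gDP fl l (K-1) (max 0 ((i : Int) - l)).toNat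

lemma gDP_zero (fl : List Char) (l : Int) (K : Nat) : gDP fl l K 0 = 0 := by
  cases K <;> simp [gDP]

lemma gDP_succ (fl : List Char) (l : Int) (K i : Nat) :
    gDP fl l K (i+1) = min (gDP fl l K i + wAt fl i) (cval fl l K (i+1)) := by
  cases K with
  | zero => simp [gDP, cval]
  | succ K => simp [gDP, cval]

lemma getD_map_range' (f : Nat → Int) (n j : Nat) (h : j < n) (d : Int) :
    ((List.range n).map f).getD j d = f j := by
  simp [List.getD_eq_getElem?_getD, h]

lemma getD_append_length (xs : List Int) (x d : Int) {n : Nat} (h : n = xs.length) :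
    (xs ++ [x]).getD n d = x := by
  subst h; simp [List.getD_eq_getElem?_getD]

lemma getD_set' (xs : List Int) (v d : Int) (i j : Nat) (hi : i < xs.length) :
    ((xs.set i v).getD j d) = if j = i then v else xs.getD j d := by
  rcases eq_or_ne j i with rfl | h
  · simp [List.getD_eq_getElem?_getD, hi]
  · simp [List.getD_eq_getElem?_getD, List.getElem?_set_ne (Ne.symm h), h]

lemma getD_replicate' (n j : Nat) (hj : j < n) (d : Int) : (List.replicate n (0:Int)).getD j d = 0 := by
  simp [List.getD_eq_getElem?_getD, hj]

lemma buildW_take (fl : List Char) : ∀ m : Nat, m ≤ fl.length →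
    (fl.take m).foldl (fun (st : List Int × Int) ch =>
      let acc := st.2 + (if ch = '1' then (1:Int) else 0)
      (st.1 ++ [acc], acc)) ([0], 0)
    = ((List.range (m+1)).map (fun j => Wc fl j), Wc fl m) := by
  intro m
  induction m with
  | zero => intro _; simp [Wc]
  | succ m ih =>
    intro hm
    have hlt : m < fl.length := by omega
    have htake : fl.take (m+1) = fl.take m ++ [fl[m]] := by
      rw [List.take_add_one]; simp [List.getElem?_eq_getElem hlt]
    rw [htake, List.foldl_append, ih (by omega)]
    have hw : wAt fl m = if fl[m] = '1' then (1:Int) else 0 := by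
      simp [wAt, List.getD_eq_getElem?_getD, List.getElem?_eq_getElem hlt]
    simp only [List.foldl_cons, List.foldl_nil, List.range_succ (n := m+1), List.map_append]
    refine Prod.ext ?_ ?_ <;> simp [Wc, hw]

lemma buildW_spec (fl : List Char) :
    (buildW fl).length = fl.length + 1 ∧
    ∀ j : Nat, j ≤ fl.length → (buildW fl).getD j 0 = Wc fl j := by
  have h := buildW_take fl fl.length le_rfl
  rw [List.take_length] at h
  unfold buildW
  rw [h]
  constructor
  · simp
  · intro j hj
    exact getD_map_range' _ _ _ (by omega) _

-- A's inner loop computes layer K cell by cell, given that 'cover' evaluates to the cover term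
lemma innerA_spec (fl : List Char) (l : Int) (K : Nat) (kI : Int) (prev dpk0 : List Int)
    (hcov : ∀ i : Nat, 1 ≤ i → i ≤ fl.length →
      (if kI > 0 then PySem.List.pyGetD prev (max 0 ((i : Int) - l)) 0 else (1000:Int)) = cval fl l K i)
    (hlen : dpk0.length = fl.length + 1) (h0 : dpk0.getD 0 0 = 0) :
    ∀ m : Nat, m ≤ fl.length →
      ((PySem.List.pyRange 1 ((m : Int) + 1) 1).foldl (stepA fl l kI prev) dpk0).length = fl.length + 1 ∧
      ∀ j : Nat, j ≤ m →
        ((PySem.List.pyRange 1 ((m : Int) + 1) 1).foldl (stepA fl l kI prev) dpk0).getD j 0 = gDP fl l K j := by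
  intro m
  induction m with
  | zero =>
    intro _
    rw [show ((0:Nat):Int) + 1 = 1 by norm_num, PySem.List.pyRange_one_eq_nil le_rfl]
    refine ⟨hlen, ?_⟩
    intro j hj
    interval_cases j
    rw [gDP_zero]; exact h0
  | succ m ih =>
    intro hm
    obtain ⟨ihlen, ihget⟩ := ih (by omega)
    have hsplit : PySem.List.pyRange 1 (((m+1 : Nat) : Int) + 1) 1
        = PySem.List.pyRange 1 ((m : Int) + 1) 1 ++ [(m : Int) + 1] := by
      have : (((m+1 : Nat) : Int) + 1) = ((m : Int) + 1) + 1 := by push_cast; ring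
      rw [this, PySem.List.pyRange_one_succ_right (by omega)]
    rw [hsplit, List.foldl_append]
    set r := (PySem.List.pyRange 1 ((m : Int) + 1) 1).foldl (stepA fl l kI prev) dpk0 with hr
    have hidx : ((m : Int) + 1 - 1) = ((m : Nat) : Int) := by ring
    have hjump : PySem.List.pyGetD r ((m : Int) + 1 - 1) 0 = gDP fl l K m := by
      rw [hidx, PySem.List.pyGetD_natCast]
      exact ihget m le_rfl
    have hw : (if PySem.List.pyGetD fl ((m : Int) + 1 - 1) ' ' = '1' then (1:Int) else 0) = wAt fl m := by
      rw [hidx, PySem.List.pyGetD_natCast]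
      simp [wAt]
    have hc : (if kI > 0 then PySem.List.pyGetD prev (max 0 ((m : Int) + 1 - l)) 0 else (1000:Int))
        = cval fl l K (m+1) := by
      have := hcov (m+1) (by omega) hm
      rwa [show (((m+1 : Nat) : Int) - l) = ((m : Int) + 1 - l) by push_cast; ring] at this
    simp only [List.foldl_cons, List.foldl_nil, stepA, hjump, hw, hc]
    rw [show ((m : Int) + 1) = ((m+1 : Nat) : Int) by push_cast; ring, PySem.List.pySetD_natCast]
    have hsetlen : (r.set (m+1) (min (gDP fl l K m + wAt fl m) (cval fl l K (m+1)))).length = fl.length + 1 := by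
      simp [ihlen]
    refine ⟨hsetlen, ?_⟩
    intro j hj
    rw [getD_set' _ _ _ _ _ (by omega)]
    rcases eq_or_ne j (m+1) with rfl | hne
    · rw [if_pos rfl, gDP_succ]
    · rw [if_neg hne]
      exact ihget j (by omega)

-- B's inner loop computes the same layer: best = gDP K m - W[m] is the running minimum invariant
lemma innerB_spec (fl : List Char) (l : Int) (K : Nat) (kI : Int) (prev W : List Int)
    (hcov : ∀ i : Nat, 1 ≤ i → i ≤ fl.length →
      (if kI > 0 then PySem.List.pyGetD prev (max 0 ((i : Int) - l)) 0 else (1000:Int)) = cval fl l K i)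
    (hW : ∀ j : Nat, j ≤ fl.length → W.getD j 0 = Wc fl j) :
    ∀ m : Nat, m ≤ fl.length →
      (((PySem.List.pyRange 1 ((m : Int) + 1) 1).foldl (stepB l kI prev W) ([0], 0)).1.length = m + 1 ∧
       ((PySem.List.pyRange 1 ((m : Int) + 1) 1).foldl (stepB l kI prev W) ([0], 0)).2
          = gDP fl l K m - Wc fl m) ∧
      ∀ j : Nat, j ≤ m →
        ((PySem.List.pyRange 1 ((m : Int) + 1) 1).foldl (stepB l kI prev W) ([0], 0)).1.getD j 0 = gDP fl l K j := by
  intro m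
  induction m with
  | zero =>
    intro _
    rw [show ((0:Nat):Int) + 1 = 1 by norm_num, PySem.List.pyRange_one_eq_nil le_rfl]
    refine ⟨⟨by simp, by simp [gDP_zero, Wc]⟩, ?_⟩
    intro j hj
    interval_cases j
    simp [gDP_zero]
  | succ m ih =>
    intro hm
    obtain ⟨⟨ihlen, ihbest⟩, ihget⟩ := ih (by omega)
    have hsplit : PySem.List.pyRange 1 (((m+1 : Nat) : Int) + 1) 1
        = PySem.List.pyRange 1 ((m : Int) + 1) 1 ++ [(m : Int) + 1] := by
      have : (((m+1 : Nat) : Int) + 1) = ((m : Int) + 1) + 1 := by push_cast; ring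
      rw [this, PySem.List.pyRange_one_succ_right (by omega)]
    rw [hsplit, List.foldl_append]
    set r := (PySem.List.pyRange 1 ((m : Int) + 1) 1).foldl (stepB l kI prev W) ([0], 0) with hr
    have hWm1 : PySem.List.pyGetD W ((m : Int) + 1) 0 = Wc fl (m+1) := by
      rw [show ((m : Int) + 1) = ((m+1 : Nat) : Int) by push_cast; ring]
      rw [PySem.List.pyGetD_natCast]
      exact hW (m+1) hm
    have hc : (if kI > 0 then PySem.List.pyGetD prev (max 0 ((m : Int) + 1 - l)) 0 else (1000:Int))
        = cval fl l K (m+1) := by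
      have := hcov (m+1) (by omega) hm
      rwa [show (((m+1 : Nat) : Int) - l) = ((m : Int) + 1 - l) by push_cast; ring] at this
    simp only [List.foldl_cons, List.foldl_nil, stepB, hWm1, hc]
    have hWsucc : Wc fl (m+1) = Wc fl m + wAt fl m := rfl
    have hg := gDP_succ fl l K m
    have hbest' : min r.2 (cval fl l K (m+1) - Wc fl (m+1)) = gDP fl l K (m+1) - Wc fl (m+1) := by
      rw [ihbest, hg, hWsucc]; omega
    refine ⟨⟨by simp [ihlen], by rw [hbest']⟩, ?_⟩
    intro j hj
    rcases Nat.lt_or_ge j (m+1) with hjm | hjm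
    · rw [List.getD_append _ _ _ _ (by omega : j < r.1.length)]
      exact ihget j (by omega)
    · have hj1 : j = m + 1 := by omega
      subst hj1
      rw [getD_append_length _ _ _ ihlen.symm, hbest']
      omega

-- A's outer loop: after t ≥ 1 iterations dpk1 holds layer t-1 (and dpk is a well-formed scratch list)
lemma outerA_spec (fl : List Char) (l : Int) :
    ∀ t : Nat, 1 ≤ t → (2 ≤ t → 1 ≤ fl.length → 0 ≤ l) →
      ((PySem.List.pyRange 0 (t : Int) 1).foldl (layerA fl l)
          (List.replicate (fl.length + 1) 0, List.replicate (fl.length + 1) 0)).1.length = fl.length + 1 ∧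
      ((PySem.List.pyRange 0 (t : Int) 1).foldl (layerA fl l)
          (List.replicate (fl.length + 1) 0, List.replicate (fl.length + 1) 0)).1.getD 0 0 = 0 ∧
      ((PySem.List.pyRange 0 (t : Int) 1).foldl (layerA fl l)
          (List.replicate (fl.length + 1) 0, List.replicate (fl.length + 1) 0)).2.length = fl.length + 1 ∧
      ∀ j : Nat, j ≤ fl.length →
        ((PySem.List.pyRange 0 (t : Int) 1).foldl (layerA fl l)
          (List.replicate (fl.length + 1) 0, List.replicate (fl.length + 1) 0)).2.getD j 0 = gDP fl l (t-1) j := by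
  intro t
  induction t with
  | zero => omega
  | succ t ih =>
    intro _ hl
    rcases Nat.eq_or_lt_of_le (show 1 ≤ t + 1 by omega) with h1 | h2
    · -- t + 1 = 1: the first iteration computes layer 0 (cover = 1000)
      have ht0 : t = 0 := by omega
      subst ht0
      rw [show ((1:Nat):Int) = 0 + 1 by norm_num, PySem.List.pyRange_one_singleton,
        List.foldl_cons, List.foldl_nil]
      have hin := innerA_spec fl l 0 0 (List.replicate (fl.length + 1) 0)
        (List.replicate (fl.length + 1) 0)
        (by intro i _ _; simp [cval]) (by simp) (getD_replicate' _ _ (by omega) _)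
        fl.length le_rfl
      simp only [layerA]
      exact ⟨by simp, getD_replicate' _ _ (by omega) _, hin.1, fun j hj => hin.2 j hj⟩
    · -- t ≥ 1: peel the last iteration, which computes layer t from layer t-1
      have ht1 : 1 ≤ t := by omega
      obtain ⟨ih1, ih2, ih3, ih4⟩ := ih ht1 (fun h2t => hl (by omega))
      have hsplit : PySem.List.pyRange 0 ((t+1 : Nat) : Int) 1
          = PySem.List.pyRange 0 (t : Int) 1 ++ [(t : Int)] := by
        rw [show ((t+1 : Nat) : Int) = (t : Int) + 1 by push_cast; ring,
          PySem.List.pyRange_one_succ_right (by positivity)]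
      rw [hsplit, List.foldl_append, List.foldl_cons, List.foldl_nil]
      set st := (PySem.List.pyRange 0 (t : Int) 1).foldl (layerA fl l)
        (List.replicate (fl.length + 1) 0, List.replicate (fl.length + 1) 0) with hst
      have hcov : ∀ i : Nat, 1 ≤ i → i ≤ fl.length →
          (if (t : Int) > 0 then PySem.List.pyGetD st.2 (max 0 ((i : Int) - l)) 0 else (1000:Int))
            = cval fl l t i := by
        intro i hi1 hin
        have hl0 : 0 ≤ l := hl (by omega) (by omega)
        rw [if_pos (by exact_mod_cast ht1)]
        set J := (max 0 ((i : Int) - l)).toNat with hJ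
        have hJc : max 0 ((i : Int) - l) = (J : Int) := by
          rw [hJ, Int.toNat_of_nonneg (le_max_left _ _)]
        have hJle : J ≤ fl.length := by
          have h1 : max 0 ((i : Int) - l) ≤ (i : Int) := by omega
          omega
        rw [hJc, PySem.List.pyGetD_natCast, ih4 J hJle]
        simp only [cval, if_neg (show ¬ t = 0 by omega), ← hJ]
      have hin := innerA_spec fl l t (t : Int) st.2 st.1 hcov ih1 ih2 fl.length le_rfl
      refine ⟨ih3, ?_, ?_, ?_⟩
      · have := ih4 0 (by omega)
        simpa [gDP_zero] using this
      · exact (by simpa [layerA] using hin.1)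
      · intro j hj
        have := hin.2 j hj
        simpa [layerA] using this

-- B's outer loop: after t ≥ 1 iterations prev holds layer t-1
lemma outerB_spec (fl : List Char) (l : Int) (W : List Int)
    (hW : ∀ j : Nat, j ≤ fl.length → W.getD j 0 = Wc fl j) :
    ∀ t : Nat, 1 ≤ t → (2 ≤ t → 1 ≤ fl.length → 0 ≤ l) →
      ((PySem.List.pyRange 0 (t : Int) 1).foldl (layerB fl l W)
          (List.replicate (fl.length + 1) 0)).length = fl.length + 1 ∧
      ∀ j : Nat, j ≤ fl.length →
        ((PySem.List.pyRange 0 (t : Int) 1).foldl (layerB fl l W)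
          (List.replicate (fl.length + 1) 0)).getD j 0 = gDP fl l (t-1) j := by
  intro t
  induction t with
  | zero => omega
  | succ t ih =>
    intro _ hl
    rcases Nat.eq_or_lt_of_le (show 1 ≤ t + 1 by omega) with h1 | h2
    · have ht0 : t = 0 := by omega
      subst ht0
      rw [show ((1:Nat):Int) = 0 + 1 by norm_num, PySem.List.pyRange_one_singleton,
        List.foldl_cons, List.foldl_nil]
      have hin := innerB_spec fl l 0 0 (List.replicate (fl.length + 1) 0) W
        (by intro i _ _; simp [cval]) hW fl.length le_rfl
      exact ⟨hin.1.1, fun j hj => hin.2 j hj⟩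
    · have ht1 : 1 ≤ t := by omega
      obtain ⟨ih1, ih2⟩ := ih ht1 (fun h2t => hl (by omega))
      have hsplit : PySem.List.pyRange 0 ((t+1 : Nat) : Int) 1
          = PySem.List.pyRange 0 (t : Int) 1 ++ [(t : Int)] := by
        rw [show ((t+1 : Nat) : Int) = (t : Int) + 1 by push_cast; ring,
          PySem.List.pyRange_one_succ_right (by positivity)]
      rw [hsplit, List.foldl_append, List.foldl_cons, List.foldl_nil]
      set prev := (PySem.List.pyRange 0 (t : Int) 1).foldl (layerB fl l W)
        (List.replicate (fl.length + 1) 0) with hprev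
      have hcov : ∀ i : Nat, 1 ≤ i → i ≤ fl.length →
          (if (t : Int) > 0 then PySem.List.pyGetD prev (max 0 ((i : Int) - l)) 0 else (1000:Int))
            = cval fl l t i := by
        intro i hi1 hin
        have hl0 : 0 ≤ l := hl (by omega) (by omega)
        rw [if_pos (by exact_mod_cast ht1)]
        set J := (max 0 ((i : Int) - l)).toNat with hJ
        have hJc : max 0 ((i : Int) - l) = (J : Int) := by
          rw [hJ, Int.toNat_of_nonneg (le_max_left _ _)]
        have hJle : J ≤ fl.length := by
          have h1 : max 0 ((i : Int) - l) ≤ (i : Int) := by omega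
          omega
        rw [hJc, PySem.List.pyGetD_natCast, ih2 J hJle]
        simp only [cval, if_neg (show ¬ t = 0 by omega), ← hJ]
      have hin := innerB_spec fl l t (t : Int) prev W hcov hW fl.length le_rfl
      exact ⟨by simpa [layerB] using hin.1.1, fun j hj => by simpa [layerB] using hin.2 j hj⟩

theorem main_eq (floor : String) (numCarpets carpetLen : Int)
    (hpre : 2 ≤ numCarpets → floor.toList ≠ [] → 0 ≤ carpetLen) :
    minimumWhiteTiles2 floor numCarpets carpetLen = minimumWhiteTiles2_alt floor numCarpets carpetLen := by
  simp only [minimumWhiteTiles2, minimumWhiteTiles2_alt]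
  set fl := floor.toList with hfl
  by_cases hnc : numCarpets ≤ 0
  · rw [if_pos hnc, PySem.List.pyRange_one_eq_nil hnc, List.foldl_nil,
      PySem.List.pyGetD_natCast]
    exact getD_replicate' _ _ (by omega) _
  · rw [if_neg hnc]
    set t := numCarpets.toNat with htdef
    have htc : (t : Int) = numCarpets := Int.toNat_of_nonneg (by omega)
    have ht1 : 1 ≤ t := by omega
    have hl : 2 ≤ t → 1 ≤ fl.length → 0 ≤ carpetLen := by
      intro h2 hlen
      exact hpre (by omega) (by rw [← List.length_pos_iff]; omega)
    have hA := outerA_spec fl carpetLen t ht1 hl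
    have hB := outerB_spec fl carpetLen (buildW fl) (buildW_spec fl).2 t ht1 hl
    rw [htc] at hA hB
    rw [PySem.List.pyGetD_natCast, PySem.List.pyGetD_natCast,
      hA.2.2.2 fl.length le_rfl, hB.2 fl.length le_rfl]

-- ===== VERDICT (by name: the statement is the Claim_ definition above) =====
theorem minimumWhiteTiles2_spec : Claim_equal_minimumWhiteTiles2 := by
  intro floor numCarpets carpetLen _ hpre
  exact main_eq floor numCarpets carpetLen hpre
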